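-- pv_equiv track=rewrite | github.com/quantitative-mri-and-in-vivo-histology/microct_io_vis | src/streaming_converter.py | compute_pyramid_shapes
-- ===== SOURCE A (Python) =====
-- def compute_pyramid_shapes(
--     base_shape: tuple[int, ...],
--     num_levels: int
-- ) -> list[tuple[int, ...]]:
--     """
--     Compute shapes for all pyramid levels.
--
--     Args:
--         base_shape: Shape of level 0 (Z, Y, X)
--         num_levels: Number of pyramid levels
--
--     Returns:
--         List of shapes, one per level
--     """
--     shapes = [base_shape]
--     for level in range(1, num_levels):
--         prev = shapes[-1]
--         # Each level is 2x smaller in all dimensions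
--         shapes.append((prev[0] // 2, prev[1] // 2, prev[2] // 2))
--     return shapes
-- ===== SOURCE B (Python) =====
-- def compute_pyramid_shapes(
--     base_shape: tuple[int, ...],
--     num_levels: int
-- ) -> list[tuple[int, ...]]:
--     """Level L's shape is base_shape right-shifted by L (floor div by 2**L), built as one comprehension."""
--     return [base_shape] + [
--         (base_shape[0] >> L, base_shape[1] >> L, base_shape[2] >> L)
--         for L in range(1, num_levels)
--     ]
-- ===== Notes on version B (the rewrite author's own statement) =====
-- stated objective: alternative
-- what changed: Replaces the stateful append loop chaining each level off shapes[-1] with a single list comprehension computing each level's shape directly from base_shape by an arithmetic right shift by the level index (closed-form floor division by 2**level).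
import Mathlib
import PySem

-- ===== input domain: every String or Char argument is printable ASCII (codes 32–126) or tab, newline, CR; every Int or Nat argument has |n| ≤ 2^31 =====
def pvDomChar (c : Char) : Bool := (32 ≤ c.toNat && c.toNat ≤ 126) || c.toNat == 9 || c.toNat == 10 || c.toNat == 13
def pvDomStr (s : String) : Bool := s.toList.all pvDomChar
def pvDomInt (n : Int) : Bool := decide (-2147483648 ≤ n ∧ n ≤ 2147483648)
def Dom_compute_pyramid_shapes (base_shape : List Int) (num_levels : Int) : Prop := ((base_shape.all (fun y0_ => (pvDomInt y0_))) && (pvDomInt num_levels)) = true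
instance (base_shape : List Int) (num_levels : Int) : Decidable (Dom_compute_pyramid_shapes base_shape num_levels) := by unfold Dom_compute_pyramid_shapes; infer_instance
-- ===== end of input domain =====

-- B builds the result as one comprehension, each level's shape a right shift of
-- base_shape by the level index, instead of A's stateful loop off shapes[-1]; same cost.

-- ===== PORT A =====
def compute_pyramid_shapes (base_shape : List Int) (num_levels : Int) : List (List Int) :=
  (PySem.List.pyRange 1 num_levels 1).foldl
    (fun shapes _level =>
      let prev := PySem.List.pyGetD shapes (-1) []   -- shapes[-1]; shapes is never empty
      shapes ++ [[PySem.Int.floordiv (PySem.List.pyGetD prev 0 0) 2,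
                  PySem.Int.floordiv (PySem.List.pyGetD prev 1 0) 2,
                  PySem.Int.floordiv (PySem.List.pyGetD prev 2 0) 2]])
    [base_shape]

-- ===== PORT B =====
def compute_pyramid_shapes_alt (base_shape : List Int) (num_levels : Int) : List (List Int) :=
  -- x >> L: Python's arithmetic right shift = Mathlib's Int >>> (exact for L ≥ 0; the range gives L ≥ 1)
  [base_shape] ++
    (PySem.List.pyRange 1 num_levels 1).map (fun L =>
      [PySem.List.pyGetD base_shape 0 0 >>> L,
       PySem.List.pyGetD base_shape 1 0 >>> L,
       PySem.List.pyGetD base_shape 2 0 >>> L])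

-- ===== PRECONDITION & SPEC =====
-- Pre_ excludes exactly the inputs where A (and B) raise IndexError:
-- num_levels ≥ 2 with fewer than 3 dimensions in base_shape.
def Pre_compute_pyramid_shapes (base_shape : List Int) (num_levels : Int) : Prop :=
  num_levels ≤ 1 ∨ 3 ≤ base_shape.length
instance (base_shape : List Int) (num_levels : Int) : Decidable (Pre_compute_pyramid_shapes base_shape num_levels) := by unfold Pre_compute_pyramid_shapes; infer_instance
def pvWitness_compute_pyramid_shapes : List Int × Int := ([9, 7, 5], 3)

def Spec_compute_pyramid_shapes (base_shape : List Int) (num_levels : Int) (out : List (List Int)) : Prop := out = compute_pyramid_shapes_alt base_shape num_levels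
instance (base_shape : List Int) (num_levels : Int) (out : List (List Int)) : Decidable (Spec_compute_pyramid_shapes base_shape num_levels out) := by unfold Spec_compute_pyramid_shapes; infer_instance

-- ===== CLAIM (what is proved, stated in full; the proofs are below) =====
def Claim_equal_compute_pyramid_shapes : Prop := ∀ (base_shape : List Int) (num_levels : Int), Dom_compute_pyramid_shapes base_shape num_levels → Pre_compute_pyramid_shapes base_shape num_levels → Spec_compute_pyramid_shapes base_shape num_levels (compute_pyramid_shapes base_shape num_levels)

-- ===== LEMMAS AND PROOFS =====

-- the shape of level L (L ≥ 1), as successive halving produces it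
def pvTri (bs : List Int) (L : Nat) : List Int :=
  [PySem.Int.floordiv (PySem.List.pyGetD bs 0 0) (2 ^ L),
   PySem.Int.floordiv (PySem.List.pyGetD bs 1 0) (2 ^ L),
   PySem.Int.floordiv (PySem.List.pyGetD bs 2 0) (2 ^ L)]

theorem pvTri_succ (bs : List Int) (L : Nat) :
    pvTri bs (L + 1) =
      [PySem.Int.floordiv (PySem.List.pyGetD (pvTri bs L) 0 0) 2,
       PySem.Int.floordiv (PySem.List.pyGetD (pvTri bs L) 1 0) 2,
       PySem.Int.floordiv (PySem.List.pyGetD (pvTri bs L) 2 0) 2] := by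
  have key : ∀ x : Int, PySem.Int.floordiv (PySem.Int.floordiv x (2 ^ L)) 2
      = PySem.Int.floordiv x (2 ^ (L + 1)) := by
    intro x
    simp only [PySem.Int.floordiv]
    rw [Int.fdiv_fdiv_eq_fdiv_mul _ (by positivity) (by norm_num)]
    ring_nf
  simp only [pvTri, PySem.List.pyGetD_ofNat', List.getD_cons_zero, List.getD_cons_succ, ← key]

theorem pvA_eq (bs : List Int) (k : Nat) :
    compute_pyramid_shapes bs (1 + (k : Int)) =
      [bs] ++ (List.range k).map (fun i => pvTri bs (i + 1)) := by
  induction k with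
  | zero =>
    have h0 : PySem.List.pyRange 1 (1 + ((0 : Nat) : Int)) 1 = [] :=
      PySem.List.pyRange_one_eq_nil (by norm_num)
    simp [compute_pyramid_shapes]
  | succ j ih =>
    unfold compute_pyramid_shapes at ih ⊢
    rw [show ((((j : Nat) + 1 : Nat) : Int)) = (j : Int) + 1 by push_cast; ring,
        show (1 + ((j : Int) + 1)) = (1 + (j : Int)) + 1 by ring,
        show PySem.List.pyRange 1 ((1 + (j : Int)) + 1) 1 = PySem.List.pyRange 1 (1 + (j : Int)) 1 ++ [1 + (j : Int)] from PySem.List.pyRange_one_succ_right (by omega), List.foldl_append, ih]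
    simp only [List.foldl_cons, List.foldl_nil, List.range_succ, List.map_append, List.map_cons,
      List.map_nil, List.cons_append, List.nil_append]
    congr 1
    cases j with
    | zero =>
      simp only [List.range_zero, List.map_nil, List.nil_append]
      rw [PySem.List.pyGetD_neg_one ([bs]) _ (by simp)]
      simp [List.getLast_singleton, pvTri]
    | succ m =>
      have hlast : PySem.List.pyGetD
          (bs :: (List.range (m + 1)).map (fun i => pvTri bs (i + 1))) (-1) ([] : List Int)
          = pvTri bs (m + 1) := by
        rw [show (bs :: (List.range (m + 1)).map (fun i => pvTri bs (i + 1)))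
              = (bs :: (List.range m).map (fun i => pvTri bs (i + 1))) ++ [pvTri bs (m + 1)] by
              simp [List.range_succ]]
        exact PySem.List.pyGetD_neg_one_append_singleton _ _ _
      rw [hlast, ← pvTri_succ]

-- Python's x >> n is floor division by 2^n; so is Int's arithmetic shift.
theorem pvShift (m : Int) (n : Nat) : m >>> ((n : Nat) : Int) = PySem.Int.floordiv m (2 ^ n) := by
  rcases m with k | k
  · rw [show ((Int.ofNat k) : Int) = ((k : Nat) : Int) from rfl, Int.shiftRight_natCast,
      Nat.shiftRight_eq_div_pow,
      show ((2 : Int) ^ n) = ((2 ^ n : Nat) : Int) by push_cast; ring]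
    exact (PySem.Int.floordiv_natCast k (2 ^ n)).symm
  · rw [Int.shiftRight_negSucc, Nat.shiftRight_eq_div_pow, eq_comm,
      PySem.Int.floordiv_eq_iff_of_pos (by positivity)]
    have h1 : (2 : Int) ^ n * ((k : Int) / 2 ^ n) + (k : Int) % 2 ^ n = (k : Int) := by
      exact_mod_cast Nat.div_add_mod k (2 ^ n)
    have h2 : (k : Int) % 2 ^ n < 2 ^ n := by exact_mod_cast Nat.mod_lt k (y := 2 ^ n) ((by positivity))
    have h3 : 0 ≤ (k : Int) % 2 ^ n := Int.emod_nonneg _ (by positivity)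
    simp only [Int.negSucc_eq]
    push_cast
    constructor
    · nlinarith [h1, h2, h3]
    · nlinarith [h1, h2, h3]

theorem pvB_eq (bs : List Int) (k : Nat) :
    compute_pyramid_shapes_alt bs (1 + (k : Int)) =
      [bs] ++ (List.range k).map (fun i => pvTri bs (i + 1)) := by
  unfold compute_pyramid_shapes_alt
  rw [PySem.List.pyRange_one]
  congr 1
  rw [show (1 + (k : Int) - 1) = (k : Int) by ring, Int.toNat_natCast, List.map_map]
  apply List.map_congr_left
  intro i hi
  simp only [Function.comp_apply, pvTri]
  rw [show ((1 : Int) + (i : Nat)) = (((i + 1 : Nat) : Nat) : Int) by push_cast; ring]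
  rw [pvShift, pvShift, pvShift]

-- ===== VERDICT (by name: the statement is the Claim_ definition above) =====
theorem compute_pyramid_shapes_spec : Claim_equal_compute_pyramid_shapes := by
  intro bs n _ hpre
  unfold Spec_compute_pyramid_shapes
  by_cases hn : n ≤ 1
  · simp [compute_pyramid_shapes, compute_pyramid_shapes_alt,
      PySem.List.pyRange_one_eq_nil (by omega : n ≤ 1)]
  · have hk : n = 1 + ((n - 1).toNat : Int) := by omega
    rw [hk, pvA_eq bs, pvB_eq]
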